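-- pv_equiv track=rewrite | github.com/noahjzc/nj-quant | strategy/rotation/config.py | resolve_alpha_direction
-- ===== SOURCE A (Python) =====
-- ALPHA158_DIRECTIONS = {
--     # KBar: 阳线实体、上影线短 → 正向
--     'KMID': 1, 'KLEN': -1, 'KMID2': 1,
--     'KUP': -1, 'KUP2': -1, 'KLOW': 1, 'KLOW2': 1,
--     'KSFT': 1, 'KSFT2': 1,
--     # Price ratios: 价格相对位置高 → 正向
--     'OPEN0': 1, 'HIGH0': 1, 'LOW0': -1,
--     # Rolling — 动量类: 正
--     'ROC': 1, 'MA': 1,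
--     # Rolling — 波动类: 负
--     'STD': -1, 'RESI': -1,
--     # Rolling — 趋势强度: 正
--     'BETA': 1, 'RSQR': 1,
--     # Rolling — 极值
--     'MAX': 1, 'MIN': -1, 'QTLU': 1, 'QTLD': -1,
--     # Rolling — 位置/排名
--     'RANK': 1, 'RSV': 1,
--     # Rolling — 路径
--     'IMAX': -1, 'IMIN': 1, 'IMXD': -1,
--     # Rolling — 价量相关
--     'CORR': 1, 'CORD': 1,
--     # Rolling — 日内涨跌比例
--     'CNTP': 1, 'CNTN': -1, 'CNTD': 1,
--     # Rolling — 价格动量 RSI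
--     'SUMP': 1, 'SUMN': -1, 'SUMD': 1,
--     # Rolling — 成交量
--     'VMA': -1, 'VSTD': -1, 'WVMA': -1,
--     'VSUMP': 1, 'VSUMN': -1, 'VSUMD': 1,
-- }
--
-- def resolve_alpha_direction(factor_name: str) -> int:
--     """根据因子名前缀推断方向。
--
--     例如 'MA5' → 前缀 'MA' → 方向 1
--         'STD20' → 前缀 'STD' → 方向 -1
--     """
--     if factor_name in ALPHA158_DIRECTIONS:
--         return ALPHA158_DIRECTIONS[factor_name]
--     # 尝试前缀匹配（如 MA5 → MA）
--     for prefix, direction in sorted(ALPHA158_DIRECTIONS.items(),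
--                                      key=lambda x: -len(x[0])):
--         if factor_name.startswith(prefix):
--             return direction
--     return 1  # 默认正向
-- ===== SOURCE B (Python) =====
-- # Every direction in ALPHA158_DIRECTIONS is +1 or -1, and no key of one sign is a
-- # prefix of a key of the other sign, so longest-prefix matching collapses to:
-- # the direction is -1 iff ANY prefix of the name is a negative-direction key.
-- _NEG_PREFIXES = {
--     'KLEN', 'KUP', 'KUP2', 'LOW0', 'STD', 'RESI', 'MIN', 'QTLD',
--     'IMAX', 'IMXD', 'CNTN', 'SUMN', 'VMA', 'VSTD', 'WVMA', 'VSUMN',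
-- }
--
--
-- def resolve_alpha_direction(factor_name: str) -> int:
--     return -1 if any(factor_name[:i] in _NEG_PREFIXES for i in range(1, 6)) else 1
-- ===== Notes on version B (the rewrite author's own statement) =====
-- stated objective: alternative
-- what changed: Instead of scanning the whole dictionary sorted by decreasing key length and testing startswith on every entry, B exploits that all directions are +/-1 and no key of one sign is a prefix of a key of the other sign: it returns -1 iff any prefix of the input (lengths 1..5) lies in a 16-element set of negative-direction keys, else 1.
import Mathlib
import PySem

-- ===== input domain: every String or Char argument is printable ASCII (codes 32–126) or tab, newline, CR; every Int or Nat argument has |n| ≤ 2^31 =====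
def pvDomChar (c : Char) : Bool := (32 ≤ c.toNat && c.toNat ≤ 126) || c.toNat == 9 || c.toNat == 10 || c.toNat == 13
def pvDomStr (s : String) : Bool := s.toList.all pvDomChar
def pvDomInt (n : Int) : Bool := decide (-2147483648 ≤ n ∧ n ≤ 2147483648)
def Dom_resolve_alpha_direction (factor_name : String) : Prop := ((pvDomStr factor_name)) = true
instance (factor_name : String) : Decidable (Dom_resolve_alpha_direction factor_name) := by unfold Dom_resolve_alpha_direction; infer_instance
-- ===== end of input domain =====

set_option maxRecDepth 65536

-- B replaces A's scan of the dictionary sorted by decreasing key length by a sign test: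
-- all directions are ±1 and no key of one sign is a prefix of a key of the other sign,
-- so the direction is -1 iff any prefix of the name (lengths 1..5) is a negative key;
-- objective: alternative O(1) algorithm over a 16-element set of negative keys.

-- ===== PORT A =====
def alphaItems : List (String × Int) :=
  [("KMID", 1), ("KLEN", -1), ("KMID2", 1),
   ("KUP", -1), ("KUP2", -1), ("KLOW", 1), ("KLOW2", 1),
   ("KSFT", 1), ("KSFT2", 1),
   ("OPEN0", 1), ("HIGH0", 1), ("LOW0", -1),
   ("ROC", 1), ("MA", 1),
   ("STD", -1), ("RESI", -1),
   ("BETA", 1), ("RSQR", 1),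
   ("MAX", 1), ("MIN", -1), ("QTLU", 1), ("QTLD", -1),
   ("RANK", 1), ("RSV", 1),
   ("IMAX", -1), ("IMIN", 1), ("IMXD", -1),
   ("CORR", 1), ("CORD", 1),
   ("CNTP", 1), ("CNTN", -1), ("CNTD", 1),
   ("SUMP", 1), ("SUMN", -1), ("SUMD", 1),
   ("VMA", -1), ("VSTD", -1), ("WVMA", -1),
   ("VSUMP", 1), ("VSUMN", -1), ("VSUMD", 1)]

def ALPHA158_DIRECTIONS : PySem.Dict String Int := PySem.Dict.ofList alphaItems

-- the 'for prefix, direction in …: if factor_name.startswith(prefix): return direction' loop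
def aScan (s : String) : List (String × Int) → Int
  | [] => 1                                     -- fell through: 'return 1'
  | (pre, dir) :: rest =>
      if PySem.Str.startswith s pre then dir else aScan s rest

def resolve_alpha_direction (factor_name : String) : Int :=
  match ALPHA158_DIRECTIONS.get? factor_name with
  | some v => v                                 -- 'if factor_name in …: return …[factor_name]'
  | none =>
      aScan factor_name
        (PySem.List.sorted ALPHA158_DIRECTIONS.items
          (fun x => -(PySem.Str.len x.1)))

-- ===== PORT B =====
-- _NEG_PREFIXES: the 16 keys whose direction is -1
def negPrefixes : PySem.Set String :=
  PySem.Set.ofList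
    ["KLEN", "KUP", "KUP2", "LOW0", "STD", "RESI", "MIN", "QTLD",
     "IMAX", "IMXD", "CNTN", "SUMN", "VMA", "VSTD", "WVMA", "VSUMN"]

-- '-1 if any(factor_name[:i] in _NEG_PREFIXES for i in range(1, 6)) else 1'
def resolve_alpha_direction_alt (factor_name : String) : Int :=
  if (PySem.List.pyRange 1 6 1).any
       (fun i => negPrefixes.contains (PySem.Str.slice factor_name none (some i)))
  then -1 else 1

-- ===== PRECONDITION & SPEC =====
def Spec_resolve_alpha_direction (factor_name : String) (out : Int) : Prop := out = resolve_alpha_direction_alt factor_name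
instance (factor_name : String) (out : Int) : Decidable (Spec_resolve_alpha_direction factor_name out) := by unfold Spec_resolve_alpha_direction; infer_instance

-- ===== CLAIM (what is proved, stated in full; the proofs are below) =====
def Claim_equal_resolve_alpha_direction : Prop := ∀ (factor_name : String), Dom_resolve_alpha_direction factor_name → Spec_resolve_alpha_direction factor_name (resolve_alpha_direction factor_name)

-- ===== LEMMAS AND PROOFS =====

-- the lookup A's scan effectively performs at prefix length i (none when i exceeds the string)
def cAt (L : List Char) (i : Nat) : Option Int :=
  if i ≤ L.length then ALPHA158_DIRECTIONS.get? (String.ofList (L.take i)) else none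

-- chain of prefix lookups of lengths n, n-1, ..., 1, defaulting to 1
def chainN (s : String) : Nat → Int
  | 0 => 1
  | n + 1 => (cAt s.toList (n + 1)).getD (chainN s n)

-- the 25 keys whose direction is +1 (proof-side only)
def posStrings : List String :=
  ["KMID", "KMID2", "KLOW", "KLOW2", "KSFT", "KSFT2", "OPEN0", "HIGH0", "ROC", "MA",
   "BETA", "RSQR", "MAX", "QTLU", "RANK", "RSV", "IMIN", "CORR", "CORD",
   "CNTP", "CNTD", "SUMP", "SUMD", "VSUMP", "VSUMD"]

theorem items_eq : ALPHA158_DIRECTIONS.items = alphaItems := by decide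

theorem keys_nodup : ALPHA158_DIRECTIONS.keys.Nodup := by decide

theorem getMem {k : String} {v : Int} (h : ALPHA158_DIRECTIONS.get? k = some v) :
    (k, v) ∈ alphaItems := by
  unfold PySem.Dict.get? at h
  rw [items_eq] at h
  rcases Option.map_eq_some_iff.mp h with ⟨p, hfind, hv⟩
  have hmem := List.mem_of_find?_eq_some hfind
  have hp : p.1 = k := by simpa using List.find?_some hfind
  obtain ⟨p1, p2⟩ := p
  simp only at hp hv
  rw [← hp, ← hv]
  exact hmem

theorem memGet {k : String} {v : Int} (h : (k, v) ∈ alphaItems) :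
    ALPHA158_DIRECTIONS.get? k = some v :=
  PySem.Dict.get?_of_mem_items ALPHA158_DIRECTIONS (by rw [items_eq]; exact h) keys_nodup

theorem keyLen : ∀ p ∈ alphaItems, 2 ≤ p.1.toList.length ∧ p.1.toList.length ≤ 5 := by decide

-- every entry is +1 with its key in posStrings, or -1 with its key in negPrefixes
theorem signClass : ∀ p ∈ alphaItems,
    (p.2 = 1 ∧ p.1 ∈ posStrings) ∨ (p.2 = -1 ∧ p.1 ∈ negPrefixes) := by decide

theorem neg_sub_alpha : ∀ k ∈ negPrefixes, (k, (-1 : Int)) ∈ alphaItems := by decide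

theorem neg_nonempty : ∀ k ∈ negPrefixes, 1 ≤ k.toList.length := by decide

-- no negative key is a prefix of a positive key
theorem noConflict : ∀ p ∈ negPrefixes, ∀ q ∈ posStrings,
    p.toList.isPrefixOf q.toList = false := by decide

-- strings shorter than every key are never keys
theorem get?_none_of_length (t : String)
    (h : t.toList.length < 2) :
    ALPHA158_DIRECTIONS.get? t = none := by
  cases hopt : ALPHA158_DIRECTIONS.get? t with
  | none => rfl
  | some v =>
    have := keyLen _ (getMem hopt)
    simp only at this
    omega

theorem cAt_one (L : List Char) : cAt L 1 = none := by
  unfold cAt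
  split
  · apply get?_none_of_length
    rw [String.toList_ofList, List.length_take]
    omega
  · rfl

theorem cAt_none_of_gt_len (L : List Char) (i : Nat) (h : L.length < i) : cAt L i = none := by
  unfold cAt
  rw [if_neg (by omega)]

theorem chainN_eq_of_none (s : String) (m n : Nat) (hmn : m ≤ n)
    (h : ∀ i, m < i → i ≤ n → cAt s.toList i = none) :
    chainN s n = chainN s m := by
  induction n with
  | zero =>
    have hm : m = 0 := by omega
    rw [hm]
  | succ n ih =>
    by_cases hm : m = n + 1
    · rw [hm]
    · have hmn' : m ≤ n := by omega
      rw [chainN, h (n + 1) (by omega) le_rfl, Option.getD_none]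
      exact ih hmn' (fun i h1 h2 => h i h1 (by omega))

theorem startswith_iff_take (s p : String) :
    PySem.Str.startswith s p = true ↔
      p.toList.length ≤ s.toList.length ∧ p.toList = s.toList.take p.toList.length := by
  constructor
  · intro h
    have hp : p.toList <+: s.toList := by
      simpa [PySem.Str.startswith, PySem.Chars.startswith, List.isPrefixOf_iff_prefix] using h
    exact ⟨hp.length_le, List.prefix_iff_eq_take.mp hp⟩
  · rintro ⟨h1, h2⟩
    have hp : p.toList <+: s.toList := List.prefix_iff_eq_take.mpr h2
    simpa [PySem.Str.startswith, PySem.Chars.startswith, List.isPrefixOf_iff_prefix] using hp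

-- the string sliced at bound i is the length-i prefix
theorem slice_eq_ofList_take (s : String) (i : Nat) :
    PySem.Str.slice s none (some ((i : Nat) : Int)) = String.ofList (s.toList.take i) := by
  apply String.ext
  rw [PySem.Str.toList_slice, PySem.Chars.slice_eq_listSlice, PySem.List.slice_to_natCast,
    String.toList_ofList]

-- classification of one effective lookup
theorem cAt_cases {L : List Char} {i : Nat} {v : Int} (h : cAt L i = some v) :
    i ≤ L.length ∧
      ((v = 1 ∧ String.ofList (L.take i) ∈ posStrings) ∨
       (v = -1 ∧ String.ofList (L.take i) ∈ negPrefixes)) := by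
  unfold cAt at h
  split at h
  · exact ⟨by assumption, signClass _ (getMem h)⟩
  · exact absurd h (by simp)

theorem cAt_of_neg {L : List Char} {i : Nat} (hle : i ≤ L.length)
    (hmem : String.ofList (L.take i) ∈ negPrefixes) : cAt L i = some (-1) := by
  unfold cAt
  rw [if_pos hle]
  exact memGet (neg_sub_alpha _ hmem)

-- a shorter prefix of the same string is a prefix of the longer one
theorem take_prefix_take {L : List Char} {i j : Nat} (h : i ≤ j) :
    L.take i <+: L.take j := by
  exact List.take_prefix_take_left h

-- does some prefix of length 1..5 (within the string) hit the negative set?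
def negHit (L : List Char) : Prop :=
  ∃ i, 1 ≤ i ∧ i ≤ 5 ∧ i ≤ L.length ∧ String.ofList (L.take i) ∈ negPrefixes

theorem chainN_neg (s : String) (n : Nat)
    (h : ∃ i, 1 ≤ i ∧ i ≤ n ∧ i ≤ s.toList.length ∧
      String.ofList (s.toList.take i) ∈ negPrefixes) :
    chainN s n = -1 := by
  induction n with
  | zero => obtain ⟨i, h1, h2, _⟩ := h; omega
  | succ n ih =>
    obtain ⟨i, h1, h2, hlen, hmem⟩ := h
    rw [chainN]
    by_cases hi : i = n + 1
    · rw [cAt_of_neg (hi ▸ hlen) (hi ▸ hmem), Option.getD_some]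
    · have hrec : chainN s n = -1 := ih ⟨i, h1, by omega, hlen, hmem⟩
      cases hc : cAt s.toList (n + 1) with
      | none => rw [Option.getD_none, hrec]
      | some v =>
        rcases cAt_cases hc with ⟨hle, hpn⟩
        rcases hpn with ⟨hv, hpos⟩ | ⟨hv, _⟩
        · exfalso
          have hpre : s.toList.take i <+: s.toList.take (n + 1) := take_prefix_take (by omega)
          have := noConflict _ hmem _ hpos
          rw [String.toList_ofList, String.toList_ofList] at this
          exact absurd ((List.isPrefixOf_iff_prefix).mpr hpre) (by simp [this])
        · rw [hv, Option.getD_some]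

theorem chainN_pos (s : String) (n : Nat)
    (h : ∀ i, 1 ≤ i → i ≤ n → i ≤ s.toList.length →
      String.ofList (s.toList.take i) ∉ negPrefixes) :
    chainN s n = 1 := by
  induction n with
  | zero => rfl
  | succ n ih =>
    rw [chainN]
    cases hc : cAt s.toList (n + 1) with
    | none =>
      rw [Option.getD_none]
      exact ih (fun i h1 h2 => h i h1 (by omega))
    | some v =>
      rcases cAt_cases hc with ⟨hle, hpn⟩
      rcases hpn with ⟨hv, _⟩ | ⟨hv, hneg⟩
      · rw [hv, Option.getD_some]
      · exact absurd hneg (h (n + 1) (by omega) le_rfl hle)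

-- one membership test of B at concrete bound i
theorem test_iff (s : String) (i : Nat) :
    (negPrefixes.contains (PySem.Str.slice s none (some ((i : Nat) : Int))) = true) ↔
      String.ofList (s.toList.take i) ∈ negPrefixes := by
  rw [slice_eq_ofList_take]
  exact PySem.Set.contains_iff _ _

-- B's guard is exactly negHit
theorem any_iff_negHit (s : String) :
    ((PySem.List.pyRange 1 6 1).any
        (fun i => negPrefixes.contains (PySem.Str.slice s none (some i))) = true) ↔
      negHit s.toList := by
  rw [show PySem.List.pyRange 1 6 1 = [1, 2, 3, 4, 5] from rfl, List.any_eq_true]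
  constructor
  · rintro ⟨x, hx, hp⟩
    have hex : ∃ i : Nat, 1 ≤ i ∧ i ≤ 5 ∧ String.ofList (s.toList.take i) ∈ negPrefixes := by
      fin_cases hx
      · exact ⟨1, by omega, by omega, (test_iff s 1).mp (by exact_mod_cast hp)⟩
      · exact ⟨2, by omega, by omega, (test_iff s 2).mp (by exact_mod_cast hp)⟩
      · exact ⟨3, by omega, by omega, (test_iff s 3).mp (by exact_mod_cast hp)⟩
      · exact ⟨4, by omega, by omega, (test_iff s 4).mp (by exact_mod_cast hp)⟩
      · exact ⟨5, by omega, by omega, (test_iff s 5).mp (by exact_mod_cast hp)⟩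
    obtain ⟨i, h1, h5, hmem⟩ := hex
    by_cases hlen : i ≤ s.toList.length
    · exact ⟨i, h1, h5, hlen, hmem⟩
    · -- the slice was the whole string: re-point the witness at the full length
      have htake : s.toList.take i = s.toList := List.take_of_length_le (by omega)
      have hmem' : String.ofList (s.toList.take s.toList.length) ∈ negPrefixes := by
        rw [List.take_length]; rw [htake] at hmem; exact hmem
      have hpos : 1 ≤ s.toList.length := by
        have := neg_nonempty _ hmem'
        rw [String.toList_ofList, List.take_length] at this
        exact this
      exact ⟨s.toList.length, hpos, by omega, le_rfl, hmem'⟩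
  · rintro ⟨i, h1, h5, hlen, hmem⟩
    refine ⟨(i : Int), ?_, ?_⟩
    · interval_cases i <;> simp
    · exact (test_iff s i).mpr hmem

-- A's scan of a block of keys of one common length i is the single lookup cAt i
theorem groupScan (s : String) (i : Nat) (G rest : List (String × Int))
    (hG : ∀ p ∈ G, p.1.toList.length = i ∧ p ∈ alphaItems)
    (hall : ∀ p ∈ alphaItems, p.1.toList.length = i → p ∈ G) :
    aScan s (G ++ rest) = (cAt s.toList i).getD (aScan s rest) := by
  cases hc : cAt s.toList i with
  | some v =>
    have hiv : i ≤ s.toList.length ∧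
        ALPHA158_DIRECTIONS.get? (String.ofList (s.toList.take i)) = some v := by
      unfold cAt at hc
      split at hc
      · exact ⟨by assumption, hc⟩
      · exact absurd hc (by simp)
    have hmemG : (String.ofList (s.toList.take i), v) ∈ G := by
      apply hall _ (getMem hiv.2)
      simp only [String.toList_ofList, List.length_take]
      omega
    rw [Option.getD_some]
    clear hall hc
    induction G with
    | nil => cases hmemG
    | cons q G' ih =>
      obtain ⟨q1, q2⟩ := q
      rw [List.cons_append, aScan]
      by_cases hq : PySem.Str.startswith s q1 = true
      · rw [if_pos hq]
        have hlen : q1.toList.length = i := (hG _ List.mem_cons_self).1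
        rcases (startswith_iff_take s q1).mp hq with ⟨_, htake⟩
        have hq1 : q1 = String.ofList (s.toList.take i) := by
          apply String.ext
          rw [String.toList_ofList, htake, hlen]
        have hgq : ALPHA158_DIRECTIONS.get? q1 = some q2 :=
          memGet (hG _ List.mem_cons_self).2
        rw [hq1, hiv.2] at hgq
        exact (Option.some.inj hgq).symm
      · rw [if_neg hq]
        apply ih (fun p hp => hG p (List.mem_cons_of_mem _ hp))
        rcases List.mem_cons.mp hmemG with heq | hmem
        · exfalso
          apply hq
          have h1 : q1 = String.ofList (s.toList.take i) := (((Prod.mk.injEq _ _ _ _).mp heq).1).symm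
          rw [h1]
          apply (startswith_iff_take s _).mpr
          constructor
          · simp only [String.toList_ofList, List.length_take]; omega
          · simp only [String.toList_ofList, List.length_take]
            rw [Nat.min_eq_left hiv.1]
        · exact hmem
  | none =>
    rw [Option.getD_none]
    clear hall
    induction G with
    | nil => rfl
    | cons q G' ih =>
      obtain ⟨q1, q2⟩ := q
      rw [List.cons_append, aScan]
      have hq : ¬ PySem.Str.startswith s q1 = true := by
        intro hq
        have hlen : q1.toList.length = i := (hG _ List.mem_cons_self).1
        rcases (startswith_iff_take s q1).mp hq with ⟨hle, htake⟩
        have hq1 : q1 = String.ofList (s.toList.take i) := by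
          apply String.ext
          rw [String.toList_ofList, htake, hlen]
        have hgq : ALPHA158_DIRECTIONS.get? q1 = some q2 :=
          memGet (hG _ List.mem_cons_self).2
        have : cAt s.toList i = some q2 := by
          unfold cAt
          rw [if_pos (hlen ▸ hle), ← hq1, hgq]
        rw [this] at hc
        cases hc
      rw [if_neg hq]
      exact ih (fun p hp => hG p (List.mem_cons_of_mem _ hp))

theorem sorted_eq :
    PySem.List.sorted ALPHA158_DIRECTIONS.items (fun x => -(PySem.Str.len x.1)) =
      ([("KMID2", 1), ("KLOW2", 1), ("KSFT2", 1), ("OPEN0", 1), ("HIGH0", 1), ("VSUMP", 1), ("VSUMN", -1), ("VSUMD", 1)] ++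
       ([("KMID", 1), ("KLEN", -1), ("KUP2", -1), ("KLOW", 1), ("KSFT", 1), ("LOW0", -1), ("RESI", -1), ("BETA", 1), ("RSQR", 1), ("QTLU", 1), ("QTLD", -1), ("RANK", 1), ("IMAX", -1), ("IMIN", 1), ("IMXD", -1), ("CORR", 1), ("CORD", 1), ("CNTP", 1), ("CNTN", -1), ("CNTD", 1), ("SUMP", 1), ("SUMN", -1), ("SUMD", 1), ("VSTD", -1), ("WVMA", -1)] ++
        ([("KUP", -1), ("ROC", 1), ("STD", -1), ("MAX", 1), ("MIN", -1), ("RSV", 1), ("VMA", -1)] ++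
         ([("MA", 1)] ++ ([] : List (String × Int))))) : List (String × Int)) := by
  decide

theorem a_eq_chain5 (s : String) : resolve_alpha_direction s = chainN s 5 := by
  unfold resolve_alpha_direction
  cases hg : ALPHA158_DIRECTIONS.get? s with
  | some v =>
    have hlen := keyLen _ (getMem hg)
    simp only at hlen
    have hc : cAt s.toList s.toList.length = some v := by
      unfold cAt
      rw [if_pos le_rfl, List.take_length, String.ofList_toList]
      exact hg
    obtain ⟨k, hk⟩ : ∃ k, s.toList.length = k + 1 := ⟨s.toList.length - 1, by omega⟩
    have h5 : chainN s 5 = chainN s s.toList.length :=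
      chainN_eq_of_none s _ 5 (by omega)
        (fun i h1 h2 => cAt_none_of_gt_len _ _ (by omega))
    rw [hk] at hc
    rw [h5, hk, chainN, hc, Option.getD_some]
  | none =>
    rw [sorted_eq]
    rw [groupScan s 5 _ _ (by decide) (by decide),
        groupScan s 4 _ _ (by decide) (by decide),
        groupScan s 3 _ _ (by decide) (by decide),
        groupScan s 2 _ _ (by decide) (by decide)]
    show _ = chainN s 5
    rw [show (5 : Nat) = 4 + 1 from rfl, chainN,
        show (4 : Nat) = 3 + 1 from rfl, chainN,
        show (3 : Nat) = 2 + 1 from rfl, chainN,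
        show (2 : Nat) = 1 + 1 from rfl, chainN, chainN, chainN,
        cAt_one, Option.getD_none]
    rfl

-- ===== VERDICT (by name: the statement is the Claim_ definition above) =====
theorem resolve_alpha_direction_spec : Claim_equal_resolve_alpha_direction := by
  intro s _
  unfold Spec_resolve_alpha_direction
  rw [a_eq_chain5]
  unfold resolve_alpha_direction_alt
  by_cases h : negHit s.toList
  · rw [if_pos ((any_iff_negHit s).mpr h)]
    obtain ⟨i, h1, h5, hlen, hmem⟩ := h
    exact chainN_neg s 5 ⟨i, h1, h5, hlen, hmem⟩
  · rw [if_neg (fun hb => h ((any_iff_negHit s).mp hb))]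
    apply chainN_pos
    intro i h1 h5 hlen hmem
    exact h ⟨i, h1, h5, hlen, hmem⟩
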